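-- pv_equiv track=rewrite | github.com/pypi-data/pypi-mirror-31 | packages/wyqpy/wyqpy-0.1.1.3-py2.py3-none-any.whl/wyqpy/math/prime.py | getLeftEDPrime
-- ===== SOURCE A (Python) =====
-- import math
--
-- def isPrime(n):
--     """
--     alter:from mpmath.libmp.libintmath import isprime
--     @param n: 大于0
--     @return: 判断n是否是质数
--     """
--     if n <= 1:
--         return False
--     for i in range(2, math.floor(math.sqrt(n)) + 1):
--         if n % i == 0:
--             return False
--     return True
--
-- def getLeftEDPrime(p):
--     """
--     获取p以n左右等距离的所有素数对
--     :param p: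
--     :param max:
--     :return:
--     """
--     d = 0
--     n = p - d
--     l = n - d
--     ps = {}
--     while l > 1:
--         if isPrime(l):
--             ps[d] = [l, p, n]
--         d += 1
--         n = p - d
--         l = n - d
--     return ps
-- ===== SOURCE B (Python) =====
-- import math
--
-- def getLeftEDPrime(p):
--     # All candidates l = p - 2*d share p's parity. For even p the only prime
--     # candidate is l = 2; for odd p a composite sieve is built once (set of
--     # all composites <= p) so each candidate is an O(1) set lookup.
--     ps = {}
--     if p <= 1:
--         return ps
--     if p % 2 == 0:
--         d = (p - 2) // 2
--         ps[d] = [2, p, p - d]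
--         return ps
--     r = math.isqrt(p)
--     comps = {j for i in range(2, r + 1) for j in range(i * i, p + 1, i)}
--     for d in range((p - 2) // 2 + 1):
--         l = p - 2 * d
--         if l not in comps:
--             ps[d] = [l, p, p - d]
--     return ps
-- ===== Notes on version B (the rewrite author's own statement) =====
-- stated objective: faster
-- what changed: A trial-divides every candidate l = p-2d separately; B builds one composite sieve (a set of all composites up to p) so each candidate is an O(1) lookup, and for even p (where every candidate is even) directly returns the single entry whose candidate is the even prime.
import Mathlib
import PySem

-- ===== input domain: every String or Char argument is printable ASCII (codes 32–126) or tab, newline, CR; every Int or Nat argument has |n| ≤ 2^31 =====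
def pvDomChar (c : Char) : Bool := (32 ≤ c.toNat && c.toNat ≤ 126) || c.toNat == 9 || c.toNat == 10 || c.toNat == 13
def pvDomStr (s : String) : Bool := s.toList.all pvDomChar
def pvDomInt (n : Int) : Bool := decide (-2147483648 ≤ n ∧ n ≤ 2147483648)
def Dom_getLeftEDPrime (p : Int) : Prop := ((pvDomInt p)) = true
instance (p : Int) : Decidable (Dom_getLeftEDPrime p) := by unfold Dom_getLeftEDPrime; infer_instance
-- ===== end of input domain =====

-- B replaces A's per-candidate trial division by one composite sieve built up front
-- (and, since all candidates share p's parity, an O(1) shortcut for even p).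

-- ===== PORT A =====
-- isPrime: `math.floor(math.sqrt(n))` is ported as `Nat.sqrt n.toNat`; exact on the
-- domain (0 ≤ n ≤ 2^31), where the double sqrt is correctly rounded.
def pvIsPrimeA (n : Int) : Bool :=
  if n ≤ 1 then false
  else (PySem.List.pyRange 2 ((Nat.sqrt n.toNat : Int) + 1) 1).all
         (fun i => !(PySem.Int.mod n i == 0))

-- the while loop of A; n and l are recomputed from d each turn, as in the source
def pvLoopA (p d : Int) (ps : PySem.Dict Int (List Int)) : PySem.Dict Int (List Int) :=
  if _h : 1 < (p - d) - d then
    pvLoopA p (d + 1)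
      (if pvIsPrimeA ((p - d) - d) then ps.insert d [(p - d) - d, p, p - d] else ps)
  else ps
termination_by (p - 2 * d).toNat
decreasing_by omega

def getLeftEDPrime (p : Int) : List (Int × List Int) :=
  (pvLoopA p 0 PySem.Dict.empty).items

-- ===== PORT B =====
-- `math.isqrt(p)` is ported as `Nat.sqrt p.toNat` (exact); the set comprehension is
-- the flatMap of the two ranges, made into a set
def pvCompsB (p : Int) : PySem.Set Int :=
  PySem.Set.ofList ((PySem.List.pyRange 2 ((Nat.sqrt p.toNat : Int) + 1) 1).flatMap
    (fun i => PySem.List.pyRange (i * i) (p + 1) i))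

def getLeftEDPrime_alt (p : Int) : List (Int × List Int) :=
  if p ≤ 1 then (PySem.Dict.empty : PySem.Dict Int (List Int)).items
  else if PySem.Int.mod p 2 == 0 then
    (((PySem.Dict.empty : PySem.Dict Int (List Int)).insert
        (PySem.Int.floordiv (p - 2) 2)
        [2, p, p - PySem.Int.floordiv (p - 2) 2])).items
  else
    ((PySem.List.pyRange 0 (PySem.Int.floordiv (p - 2) 2 + 1) 1).foldl
      (fun ps d =>
        if (pvCompsB p).contains (p - 2 * d) then ps
        else ps.insert d [p - 2 * d, p, p - d])
      (PySem.Dict.empty : PySem.Dict Int (List Int))).items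

-- ===== PRECONDITION & SPEC =====
def Spec_getLeftEDPrime (p : Int) (out : List (Int × List Int)) : Prop := out = getLeftEDPrime_alt p
instance (p : Int) (out : List (Int × List Int)) : Decidable (Spec_getLeftEDPrime p out) := by unfold Spec_getLeftEDPrime; infer_instance

-- ===== CLAIM (what is proved, stated in full; the proofs are below) =====
def Claim_equal_getLeftEDPrime : Prop := ∀ (p : Int), Dom_getLeftEDPrime p → Spec_getLeftEDPrime p (getLeftEDPrime p)

-- ===== LEMMAS AND PROOFS =====

-- common characterisation: the association list produced from counter d onwards
def pvSpecTail (p d : Int) : List (Int × List Int) :=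
  if _h : 1 < p - 2 * d then
    (if pvIsPrimeA (p - 2 * d) then [(d, [p - 2 * d, p, p - d])] else []) ++ pvSpecTail p (d + 1)
  else []
termination_by (p - 2 * d).toNat
decreasing_by omega

lemma pvLoopA_items (p : Int) : ∀ (d : Int) (ps : PySem.Dict Int (List Int)),
    (∀ k, ps.contains k = true → k < d) →
    (pvLoopA p d ps).items = ps.items ++ pvSpecTail p d := by
  intro d ps
  induction d, ps using pvLoopA.induct p with
  | case1 d ps hlt ih =>
    intro h
    rw [pvLoopA, dif_pos hlt, pvSpecTail, dif_pos (by omega : 1 < p - 2 * d)]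
    have hd : ps.contains d = false := by
      by_contra hc
      have := h d (by simpa using hc)
      omega
    have h' : ∀ k, (if h : pvIsPrimeA ((p - d) - d) = true then ps.insert d [(p - d) - d, p, p - d] else ps).contains k = true → k < d + 1 := by
      intro k hk
      by_cases hp : pvIsPrimeA ((p - d) - d) = true
      · rw [dif_pos hp, PySem.Dict.contains_insert] at hk
        rcases Bool.or_eq_true_iff.mp hk with h1 | h1
        · have : k = d := by simpa using h1
          omega
        · have := h k h1; omega
      · rw [dif_neg hp] at hk; have := h k hk; omega
    simp only [dite_eq_ite] at ih h'
    rw [ih h']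
    have hps : p - 2 * d = (p - d) - d := by ring
    by_cases hp : pvIsPrimeA ((p - d) - d) = true
    · rw [hps, if_pos hp, if_pos hp, PySem.Dict.items_insert_of_not_contains ps _ hd]
      simp
    · rw [hps, if_neg hp, if_neg hp]
      simp
  | case2 d ps hlt =>
    intro h
    rw [pvLoopA, dif_neg hlt, pvSpecTail, dif_neg (by omega : ¬ 1 < p - 2 * d)]
    simp

-- a trial division by i with i * i ≤ n witnesses non-primality
lemma pvIsPrimeA_eq_false_iff (n : Int) (hn : 2 ≤ n) :
    pvIsPrimeA n = false ↔ ∃ i : Int, 2 ≤ i ∧ i * i ≤ n ∧ i ∣ n := by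
  rw [pvIsPrimeA, if_neg (by omega : ¬ n ≤ 1), List.all_eq_false]
  constructor
  · rintro ⟨i, hi, hfi⟩
    rw [PySem.List.mem_pyRange_one] at hi
    have hmod : PySem.Int.mod n i = 0 := by simpa using hfi
    have hdvd : i ∣ n := (PySem.Int.mod_eq_zero_iff_dvd n i).mp hmod
    refine ⟨i, hi.1, ?_, hdvd⟩
    have h2 : i.toNat * i.toNat ≤ n.toNat := Nat.le_sqrt.mp (by omega)
    zify at h2
    rw [Int.toNat_of_nonneg (show (0:Int) ≤ i by omega)] at h2
    omega
  · rintro ⟨i, h2i, hii, hdvd⟩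
    have h2 : i.toNat * i.toNat ≤ n.toNat := by
      zify
      rw [Int.toNat_of_nonneg (show (0:Int) ≤ i by omega)]
      omega
    refine ⟨i, ?_, ?_⟩
    · rw [PySem.List.mem_pyRange_one]
      have := Nat.le_sqrt.mpr h2
      omega
    · simp [PySem.Int.mod_eq_zero_iff_dvd, hdvd]

-- sieve correctness: for 2 ≤ l ≤ p, membership in comps is exactly non-primality
lemma pvCompsB_contains (p l : Int) (h2 : 2 ≤ l) (hp : l ≤ p) :
    (pvCompsB p).contains l = !pvIsPrimeA l := by
  have key : (pvCompsB p).contains l = true ↔ pvIsPrimeA l = false := by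
    rw [PySem.Set.contains_iff, pvCompsB, PySem.Set.mem_ofList, List.mem_flatMap,
      pvIsPrimeA_eq_false_iff l h2]
    constructor
    · rintro ⟨i, hi, hmem⟩
      rw [PySem.List.mem_pyRange_one] at hi
      rw [PySem.List.mem_pyRange_iff_of_pos (by omega : (0:Int) < i)] at hmem
      obtain ⟨hle, _, hdvd⟩ := hmem
      refine ⟨i, hi.1, hle, ?_⟩
      have : i ∣ (l - i * i) + i * i := dvd_add hdvd (dvd_mul_left i i)
      simpa using this
    · rintro ⟨i, h2i, hii, hdvd⟩
      have hsq : i.toNat * i.toNat ≤ p.toNat := by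
        zify
        rw [Int.toNat_of_nonneg (show (0:Int) ≤ i by omega)]
        omega
      refine ⟨i, ?_, ?_⟩
      · rw [PySem.List.mem_pyRange_one]
        have := Nat.le_sqrt.mpr hsq
        omega
      · rw [PySem.List.mem_pyRange_iff_of_pos (by omega : (0:Int) < i)]
        exact ⟨hii, by omega, dvd_sub hdvd (dvd_mul_left i i)⟩
  cases hb : pvIsPrimeA l with
  | false => simp [hb] at key; simp [key]
  | true => simp [hb] at key ⊢; simpa using key

-- even p: every candidate except l = 2 is an even composite
lemma pvSpecTail_even (p : Int) (hp : 2 ≤ p) (he : (2:Int) ∣ p) :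
    ∀ (m : Nat) (d : Int), (p - 2 - 2 * d).toNat = m → 0 ≤ d → 2 * d ≤ p - 2 →
      pvSpecTail p d = [(PySem.Int.floordiv (p - 2) 2,
        [2, p, p - PySem.Int.floordiv (p - 2) 2])] := by
  have hds : 2 * PySem.Int.floordiv (p - 2) 2 = p - 2 := by
    rw [PySem.Int.floordiv_eq_ediv_of_pos (by omega)]
    omega
  intro m
  induction m using Nat.strong_induction_on with
  | _ m IH =>
    intro d hm hd0 hdp
    rw [pvSpecTail, dif_pos (by omega : 1 < p - 2 * d)]
    by_cases hdd : d = PySem.Int.floordiv (p - 2) 2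
    · have hl : p - 2 * d = 2 := by omega
      have hp2 : pvIsPrimeA 2 = true := by
        have hs : Nat.sqrt 2 = 1 := by simp
        rw [pvIsPrimeA, if_neg (by omega), show (2:Int).toNat = 2 from rfl, hs,
          show ((1:Nat):Int) + 1 = 2 by norm_num,
          PySem.List.pyRange_one_eq_nil (by omega)]
        rfl
      rw [hl, if_pos hp2, pvSpecTail, dif_neg (by omega : ¬ 1 < p - 2 * (d + 1))]
      simp [hdd]
    · have hl4 : 4 ≤ p - 2 * d := by omega
      have hnp : pvIsPrimeA (p - 2 * d) = false := by
        rw [pvIsPrimeA_eq_false_iff _ (by omega)]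
        exact ⟨2, by omega, by omega, by omega⟩
      rw [if_neg (by simp [hnp]), IH (p - 2 - 2 * (d + 1)).toNat (by omega) (d + 1) rfl
        (by omega) (by omega)]
      simp

lemma pvFoldB_items (p : Int) (hp : 2 ≤ p) :
    ∀ (m : Nat) (a : Int) (ps : PySem.Dict Int (List Int)),
      (PySem.Int.floordiv (p - 2) 2 + 1 - a).toNat = m → 0 ≤ a →
      (∀ k, ps.contains k = true → k < a) →
      ((PySem.List.pyRange a (PySem.Int.floordiv (p - 2) 2 + 1) 1).foldl
        (fun ps d =>
          if (pvCompsB p).contains (p - 2 * d) then ps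
          else ps.insert d [p - 2 * d, p, p - d]) ps).items
        = ps.items ++ pvSpecTail p a := by
  have hK : PySem.Int.floordiv (p - 2) 2 = (p - 2) / 2 :=
    PySem.Int.floordiv_eq_ediv_of_pos (by omega)
  intro m
  induction m using Nat.strong_induction_on with
  | _ m IH =>
    intro a ps hm ha hkeys
    by_cases hak : a < PySem.Int.floordiv (p - 2) 2 + 1
    · rw [PySem.List.pyRange_one_cons hak, List.foldl_cons]
      have hl2 : 2 ≤ p - 2 * a := by omega
      have hlp : p - 2 * a ≤ p := by omega
      rw [pvCompsB_contains p _ hl2 hlp]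
      rw [pvSpecTail, dif_pos (by omega : 1 < p - 2 * a)]
      have hca : ps.contains a = false := by
        by_contra hc
        have := hkeys a (by simpa using hc)
        omega
      cases hpr : pvIsPrimeA (p - 2 * a) with
      | false =>
        rw [if_pos (by simp)]
        rw [IH (PySem.Int.floordiv (p - 2) 2 + 1 - (a + 1)).toNat (by omega) (a + 1) ps rfl
            (by omega) (fun k hk => by have := hkeys k hk; omega)]
        simp
      | true =>
        rw [if_neg (by simp)]
        have hkeys' : ∀ k, (ps.insert a [p - 2 * a, p, p - a]).contains k = true → k < a + 1 := by
          intro k hk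
          rw [PySem.Dict.contains_insert] at hk
          rcases Bool.or_eq_true_iff.mp hk with h1 | h1
          · have : k = a := by simpa using h1
            omega
          · have := hkeys k h1; omega
        rw [IH (PySem.Int.floordiv (p - 2) 2 + 1 - (a + 1)).toNat (by omega) (a + 1)
            (ps.insert a [p - 2 * a, p, p - a]) rfl (by omega) hkeys']
        rw [PySem.Dict.items_insert_of_not_contains ps _ hca]
        simp
    · rw [PySem.List.pyRange_one_eq_nil (by omega), List.foldl_nil,
        pvSpecTail, dif_neg (by omega : ¬ 1 < p - 2 * a)]
      simp

-- ===== VERDICT (by name: the statement is the Claim_ definition above) =====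
theorem getLeftEDPrime_spec : Claim_equal_getLeftEDPrime := by
  intro p _
  unfold Spec_getLeftEDPrime getLeftEDPrime getLeftEDPrime_alt
  rw [pvLoopA_items p 0 PySem.Dict.empty (by simp)]
  by_cases h1 : p ≤ 1
  · rw [if_pos h1, pvSpecTail, dif_neg (by omega : ¬ 1 < p - 2 * 0)]
    simp
  · rw [if_neg h1]
    by_cases h2 : PySem.Int.mod p 2 = 0
    · have hdvd : (2:Int) ∣ p := (PySem.Int.mod_eq_zero_iff_dvd p 2).mp h2
      rw [if_pos (by simpa using h2)]
      have hds : 2 * PySem.Int.floordiv (p - 2) 2 = p - 2 := by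
        rw [PySem.Int.floordiv_eq_ediv_of_pos (by omega)]
        omega
      rw [PySem.Dict.items_insert_of_not_contains _ _ (by simp)]
      rw [pvSpecTail_even p (by omega) hdvd (p - 2 - 2 * 0).toNat 0 rfl (by omega) (by omega)]
    · rw [if_neg (by simpa using h2)]
      rw [pvFoldB_items p (by omega) (PySem.Int.floordiv (p - 2) 2 + 1 - 0).toNat 0
        PySem.Dict.empty rfl (by omega) (by simp)]
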